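-- pv_equiv track=rewrite | github.com/swas06/Protein-secondary-structure-disorder-prediction-dashboard | src/prediction/secondary_structure.py | predict_secondary_structure
-- ===== SOURCE A (Python) =====
-- def predict_secondary_structure(sequence):
--     # Placeholder (replace with real API later)
--     result = ""
--
--     for i in range(len(sequence)):
--         if i % 3 == 0:
--             result += "H"
--         elif i % 3 == 1:
--             result += "E"
--         else:
--             result += "C"
--
--     return result
-- ===== SOURCE B (Python) =====
-- def predict_secondary_structure(sequence):
--     # Closed form: repeat the HEC pattern enough to cover the sequence, then truncate.
--     return ("HEC" * (len(sequence) // 3 + 1))[:len(sequence)]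
-- ===== Notes on version B (the rewrite author's own statement) =====
-- stated objective: simpler
-- what changed: Replaces the per-index loop with if/elif branches and repeated string concatenation by a closed-form repeat-and-truncate of the three-letter pattern based only on the sequence length.
import Mathlib
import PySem

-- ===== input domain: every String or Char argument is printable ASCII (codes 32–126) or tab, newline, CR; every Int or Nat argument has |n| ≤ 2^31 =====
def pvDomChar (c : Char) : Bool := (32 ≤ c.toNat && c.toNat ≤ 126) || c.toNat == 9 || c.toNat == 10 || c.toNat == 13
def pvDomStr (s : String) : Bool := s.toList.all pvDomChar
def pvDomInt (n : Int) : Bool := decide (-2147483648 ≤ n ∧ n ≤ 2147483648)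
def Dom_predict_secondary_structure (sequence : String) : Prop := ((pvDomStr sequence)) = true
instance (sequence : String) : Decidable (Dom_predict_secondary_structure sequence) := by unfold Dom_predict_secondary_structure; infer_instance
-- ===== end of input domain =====

-- B replaces A's per-index if/elif loop with a closed-form repeat-and-truncate of the "HEC" pattern (objective: simpler).

-- ===== PORT A =====
-- for i in range(len(sequence)): append "H"/"E"/"C" by i % 3
def predict_secondary_structure (sequence : String) : String :=
  String.ofList ((PySem.List.pyRange 0 (PySem.Str.len sequence)).foldl
    (fun result i =>
      if i % 3 == 0 then result ++ ['H']
      else if i % 3 == 1 then result ++ ['E']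
      else result ++ ['C']) [])

-- ===== PORT B =====
-- return ("HEC" * (len(sequence) // 3 + 1))[:len(sequence)]
def predict_secondary_structure_alt (sequence : String) : String :=
  String.ofList (PySem.List.slice
    (List.flatten (List.replicate (PySem.Int.floordiv (PySem.Str.len sequence) 3 + 1).toNat ['H', 'E', 'C']))
    none (some (PySem.Str.len sequence)))

-- ===== PRECONDITION & SPEC =====
def Spec_predict_secondary_structure (sequence : String) (out : String) : Prop := out = predict_secondary_structure_alt sequence
instance (sequence : String) (out : String) : Decidable (Spec_predict_secondary_structure sequence out) := by unfold Spec_predict_secondary_structure; infer_instance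

-- ===== CLAIM (what is proved, stated in full; the proofs are below) =====
def Claim_equal_predict_secondary_structure : Prop := ∀ (sequence : String), Dom_predict_secondary_structure sequence → Spec_predict_secondary_structure sequence (predict_secondary_structure sequence)

-- ===== LEMMAS AND PROOFS =====

def pvHecChar (k : Nat) : Char := if k % 3 = 0 then 'H' else if k % 3 = 1 then 'E' else 'C'

theorem pvFoldl_append_map {ι : Type} (l : List ι) (a : List Char) (f : ι → Char) :
    l.foldl (fun r i => r ++ [f i]) a = a ++ l.map f := by
  induction l generalizing a with
  | nil => simp
  | cons x xs ih => simp [List.foldl, ih]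

theorem pvA_eq (n : Nat) :
    ((PySem.List.pyRange 0 (n : Int)).foldl
      (fun result i =>
        if i % 3 == 0 then result ++ ['H']
        else if i % 3 == 1 then result ++ ['E']
        else result ++ ['C']) []) = (List.range n).map pvHecChar := by
  have h : (fun (result : List Char) (i : Int) =>
        if i % 3 == 0 then result ++ ['H']
        else if i % 3 == 1 then result ++ ['E']
        else result ++ ['C']) =
      (fun r i => r ++ [if i % 3 == 0 then 'H' else if (i : Int) % 3 == 1 then 'E' else 'C']) := by
    funext r i; by_cases h0 : i % 3 == 0 <;> by_cases h1 : i % 3 == 1 <;> simp [h0, h1]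
  rw [PySem.List.pyRange_zero_natCast, h, pvFoldl_append_map]
  simp only [List.nil_append, List.map_map]
  apply List.map_congr_left
  intro k _
  simp only [Function.comp, pvHecChar]
  have h0 : ((k : Int) % 3 = 0 ↔ k % 3 = 0) := by omega
  have h1 : ((k : Int) % 3 = 1 ↔ k % 3 = 1) := by omega
  by_cases c0 : k % 3 = 0 <;> by_cases c1 : k % 3 = 1 <;>
    simp [c0, c1, h0, h1]

theorem pvRep_eq (k : Nat) :
    (List.flatten (List.replicate k (['H', 'E', 'C'] : List Char)))
      = (List.range (3 * k)).map pvHecChar := by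
  induction k with
  | zero => simp
  | succ k ih =>
    have e : 3 * (k + 1) = 3 * k + 1 + 1 + 1 := by ring
    have h0 : (3 * k) % 3 = 0 := by omega
    have h1 : (3 * k + 1) % 3 = 1 := by omega
    have h2 : ¬ ((3 * k + 1 + 1) % 3 = 0) ∧ ¬ ((3 * k + 1 + 1) % 3 = 1) := by omega
    simp [List.replicate_succ', ih, e, List.range_succ, pvHecChar, h0, h1]

theorem pvB_eq (n : Nat) :
    (PySem.List.slice
      (List.flatten (List.replicate (PySem.Int.floordiv (n : Int) 3 + 1).toNat (['H','E','C'] : List Char)))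
      none (some (n : Int))) = (List.range n).map pvHecChar := by
  rw [PySem.List.slice_to_natCast]
  have hd := PySem.Int.floordiv_eq_ediv_of_pos (a := (n : Int)) (b := 3) (by norm_num)
  have hk : (PySem.Int.floordiv (n : Int) 3 + 1).toNat = n / 3 + 1 := by omega
  rw [hk, pvRep_eq, ← List.map_take, List.take_range]
  have : min n (3 * (n / 3 + 1)) = n := by omega
  rw [this]

-- ===== VERDICT (by name: the statement is the Claim_ definition above) =====
theorem predict_secondary_structure_spec : Claim_equal_predict_secondary_structure := by
  intro sequence _
  unfold Spec_predict_secondary_structure predict_secondary_structure predict_secondary_structure_alt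
  rw [PySem.Str.len_eq]
  rw [pvA_eq, pvB_eq]
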